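-- pv_equiv track=rewrite | github.com/karcheba1/goph419-f2024-examples | src/goph419/binary.py | binary_int32_lit
-- ===== SOURCE A (Python) =====
-- def binary_int32_lit(x):
--     """Return binary string representing an unsigned 32-bit integer.
--     Little endian format (least significant bit first).
--
--     Inputs
--     ------
--     x : int
--
--     Returns
--     -------
--     str
--         String of binary digits in little endian format.
--     """
--     p = 0
--     d = []
--     while p < 32:
--         d.append(x % 2)
--         x //= 2
--         p += 1
--     return "".join(str(b) for b in d)
-- ===== SOURCE B (Python) =====
-- def binary_int32_lit(x):
--     """Return binary string representing an unsigned 32-bit integer.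
--     Little endian format (least significant bit first).
--     """
--     m = x % 0x100000000
--     return format(m, "032b")[::-1]
-- ===== Notes on version B (the rewrite author's own statement) =====
-- stated objective: idiomatic
-- what changed: Replaces the explicit 32-iteration divmod loop with mutable state by one closed-form expression: reduce x modulo 2**32 once, format as a zero-padded 32-bit binary string, and reverse it.
import Mathlib
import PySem

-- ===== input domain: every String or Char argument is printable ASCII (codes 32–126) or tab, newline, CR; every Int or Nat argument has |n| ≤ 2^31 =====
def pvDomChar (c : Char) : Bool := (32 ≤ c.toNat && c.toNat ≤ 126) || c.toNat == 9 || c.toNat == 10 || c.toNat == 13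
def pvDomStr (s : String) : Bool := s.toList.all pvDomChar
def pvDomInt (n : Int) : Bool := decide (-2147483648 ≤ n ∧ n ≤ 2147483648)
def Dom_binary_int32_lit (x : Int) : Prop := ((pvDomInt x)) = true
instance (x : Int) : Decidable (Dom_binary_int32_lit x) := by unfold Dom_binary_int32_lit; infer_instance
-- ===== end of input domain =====

-- B replaces A's 32-step divmod loop by one closed-form expression (reduce mod 2^32, format
-- as a zero-padded 32-bit binary string, reverse); objective: idiomatic, same cost.

-- ===== PORT A =====
-- while p < 32: d.append(x % 2); x //= 2; p += 1   — state (d, x), 32 iterations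
def binary_int32_lit (x : Int) : String :=
  let s := (List.range 32).foldl
    (fun (s : List Int × Int) _ => (s.1 ++ [PySem.Int.mod s.2 2], PySem.Int.floordiv s.2 2))
    ([], x)
  String.join (s.1.map PySem.Int.toStr)   -- "".join(str(b) for b in d)

-- ===== PORT B =====
-- hand port of format(m, "b") for m ≥ 0: binary digits, most significant first ([] for 0;
-- the zero-padding below makes the 0 case agree with Python's "0")
def fmtBinDigits : Nat → List Char
  | 0 => []
  | n+1 => fmtBinDigits ((n+1)/2) ++ [if (n+1) % 2 = 1 then '1' else '0']

def binary_int32_lit_alt (x : Int) : String :=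
  let m := (PySem.Int.mod x 4294967296).toNat       -- m = x % 0x100000000 (nonnegative)
  let s := List.replicate (32 - (fmtBinDigits m).length) '0' ++ fmtBinDigits m  -- format(m, "032b")
  String.ofList s.reverse                                -- [::-1]

-- ===== PRECONDITION & SPEC =====
def Spec_binary_int32_lit (x : Int) (out : String) : Prop := out = binary_int32_lit_alt x
instance (x : Int) (out : String) : Decidable (Spec_binary_int32_lit x out) := by unfold Spec_binary_int32_lit; infer_instance

-- ===== CLAIM (what is proved, stated in full; the proofs are below) =====
def Claim_equal_binary_int32_lit : Prop := ∀ (x : Int), Dom_binary_int32_lit x → Spec_binary_int32_lit x (binary_int32_lit x)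

-- ===== LEMMAS AND PROOFS =====

-- character of bit i of n (little-endian position i)
def bitChar (n : Nat) (i : Nat) : Char := if n.testBit i then '1' else '0'

-- B side: reversed zero-padded binary of n < 2^L is the little-endian bit string
theorem fmt_reverse_eq (L : Nat) : ∀ n : Nat, n < 2^L →
    (List.replicate (L - (fmtBinDigits n).length) '0' ++ fmtBinDigits n).reverse
      = (List.range L).map (bitChar n) := by
  induction L with
  | zero => intro n hn; interval_cases n; simp [fmtBinDigits]
  | succ L ih =>
    intro n hn
    cases n with
    | zero =>
      have hb : bitChar 0 = fun _ => '0' := funext fun i => by simp [bitChar]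
      simp [fmtBinDigits, hb, List.map_const']
    | succ k =>
      have hd : (k+1) / 2 < 2^L := by
        have h2 : (2:Nat)^(L+1) = 2^L * 2 := by ring
        omega
      have IH := ih ((k+1)/2) hd
      simp only [List.reverse_append, List.reverse_replicate] at IH
      have hsub : L + 1 - ((fmtBinDigits ((k+1)/2)).length + 1) = L - (fmtBinDigits ((k+1)/2)).length := by omega
      have hcomp : (bitChar (k+1)) ∘ Nat.succ = bitChar ((k+1)/2) := by
        funext i
        simp [bitChar, Function.comp, Nat.testBit_add_one]
      have hc0 : bitChar (k+1) 0 = (if (k + 1) % 2 = 1 then '1' else '0') := by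
        simp [bitChar, Nat.testBit_zero]
      rw [List.range_succ_eq_map]
      simp only [fmtBinDigits, List.length_append, List.length_singleton,
        List.reverse_append, List.reverse_replicate, List.reverse_cons, List.map_cons,
        List.map_map, hsub, hcomp, hc0]
      simp only [List.reverse_nil, List.nil_append, List.cons_append]
      exact congrArg _ IH

-- A side: the loop over range k produces the k little-endian divmod bits and x // 2^k
theorem loopA_eq (k : Nat) (x : Int) :
    (List.range k).foldl
      (fun (s : List Int × Int) _ => (s.1 ++ [PySem.Int.mod s.2 2], PySem.Int.floordiv s.2 2))
      ([], x)
    = ((List.range k).map (fun i => PySem.Int.mod (PySem.Int.floordiv x (2^i)) 2),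
       PySem.Int.floordiv x (2^k)) := by
  induction k with
  | zero => simp [PySem.Int.floordiv_eq_ediv_of_pos]
  | succ k ih =>
    rw [List.range_succ, List.foldl_append, ih]
    simp only [List.foldl_cons, List.foldl_nil, List.map_append, List.map_cons, List.map_nil,
      Prod.mk.injEq]
    refine ⟨trivial, ?_⟩
    rw [PySem.Int.floordiv_eq_ediv_of_pos (by positivity),
      PySem.Int.floordiv_eq_ediv_of_pos (by norm_num),
      PySem.Int.floordiv_eq_ediv_of_pos (by positivity),
      Int.ediv_ediv_of_nonneg (by positivity)]
    ring_nf

-- each bit of x equals the bit of x % 2^32 (as a Nat), for i < 32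
theorem bit_congr (x : Int) (i : Nat) (hi : i < 32) :
    PySem.Int.mod (PySem.Int.floordiv x (2^i)) 2
      = if ((PySem.Int.mod x 4294967296).toNat).testBit i then 1 else 0 := by
  rw [PySem.Int.floordiv_eq_ediv_of_pos (by positivity),
    PySem.Int.mod_eq_emod_of_pos (by norm_num),
    PySem.Int.mod_eq_emod_of_pos (by norm_num)]
  set n : Nat := (x % 4294967296).toNat with hn
  have hnn : ((n : Int)) = x % 4294967296 :=
    Int.toNat_of_nonneg (Int.emod_nonneg x (by norm_num))
  have hq : 4294967296 * (x / 4294967296) + x % 4294967296 = x := Int.mul_ediv_add_emod x 4294967296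
  have h32 : ((2:Int)^(31-i) * 2) * 2^i = 4294967296 := by
    have h : 31 - i + 1 + i = 32 := by omega
    rw [← pow_succ, ← pow_add, h]
    norm_num
  have hx : x = (n : Int) + ((x / 4294967296) * (2^(31-i) * 2)) * 2^i := by
    rw [hnn]
    linear_combination (-1 : Int) * hq - (x / 4294967296) * h32
  rw [hx, Int.add_mul_ediv_right _ _ (by positivity), ← mul_assoc,
    Int.add_mul_emod_self_right]
  have hcast : ((n : Int)) / ((2:Int)^i) % 2 = ((n / 2^i % 2 : Nat) : Int) := by
    push_cast
    rfl
  rw [hcast]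
  have htb : n.testBit i = decide (n / 2^i % 2 = 1) := Nat.testBit_eq_decide_div_mod_eq
  have hlt : n / 2^i % 2 < 2 := Nat.mod_lt _ (by norm_num)
  rw [htb]
  by_cases h1 : n / 2^i % 2 = 1
  · simp [h1]
  · have h0 : n / 2^i % 2 = 0 := by omega
    simp [h0]

theorem join_aux : ∀ (t : List String) (s : String), List.foldl (· ++ ·) s t = s ++ List.foldl (· ++ ·) "" t := by
  intro t
  induction t with
  | nil => intro s; simp
  | cons a t ih =>
    intro s
    simp only [List.foldl_cons]
    rw [ih (s ++ a), ih ("" ++ a), String.empty_append, String.append_assoc]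

theorem join_mk {α : Type} (c : α → Char) (l : List α) :
    String.join (l.map fun i => String.ofList [c i]) = String.ofList (l.map c) := by
  induction l with
  | nil => rfl
  | cons a t ih =>
    simp only [List.map_cons, String.join]
    rw [List.foldl_cons, join_aux, String.empty_append, ← String.join, ih,
      ← String.ofList_append]
    rfl

-- ===== VERDICT (by name: the statement is the Claim_ definition above) =====
theorem binary_int32_lit_spec : Claim_equal_binary_int32_lit := by
  intro x _
  unfold Spec_binary_int32_lit binary_int32_lit binary_int32_lit_alt
  set n : Nat := (PySem.Int.mod x 4294967296).toNat with hn
  have hmod : PySem.Int.mod x 4294967296 = x % 4294967296 :=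
    PySem.Int.mod_eq_emod_of_pos (by norm_num)
  have hnlt : n < 2^32 := by
    have h2 : x % 4294967296 < 4294967296 := Int.emod_lt_of_pos x (by norm_num)
    have h3 : 0 ≤ x % 4294967296 := Int.emod_nonneg x (by norm_num)
    have : n = (x % 4294967296).toNat := by rw [hn, hmod]
    rw [this]
    have : (2:Nat)^32 = 4294967296 := by norm_num
    omega
  rw [loopA_eq]
  simp only [List.map_map]
  have hmap : (List.range 32).map
      (PySem.Int.toStr ∘ (fun i => PySem.Int.mod (PySem.Int.floordiv x (2^i)) 2))
      = (List.range 32).map (fun i => String.ofList [bitChar n i]) := by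
    apply List.map_congr_left
    intro i hi
    have hi32 : i < 32 := List.mem_range.mp hi
    simp only [Function.comp_apply, bit_congr x i hi32, ← hn]
    by_cases h : n.testBit i
    · simp only [h, bitChar, if_pos]
      rfl
    · simp only [h, bitChar, if_false, Bool.false_eq_true]
      rfl
  rw [hmap, join_mk]
  congr 1
  exact (fmt_reverse_eq 32 n hnlt).symm
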